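-- pv_equiv track=rewrite | github.com/Davidkatom/Crosstalk | Ramsey_ExperimentV3.py | create_crosstalk_states
-- ===== SOURCE A (Python) =====
-- def create_crosstalk_states(n):
--     state_cross_0_string = ["0"] * (2 * n)
--     state_cross_1_string = ["0"] * (2 * n)
--     for i in range(n):
--         if (i - 1) % 4 == 0:
--             state_cross_0_string[i - 1] = "+"
--             state_cross_0_string[i] = "1"
--             state_cross_0_string[i + 1] = "+"
--         if (i - 3) % 4 == 0:
--             state_cross_1_string[i - 1] = "+"
--             state_cross_1_string[i] = "1"
--             state_cross_1_string[i + 1] = "+"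
--     state_cross_0_string = state_cross_0_string[:n]
--     state_cross_1_string = state_cross_1_string[:n]
--
--     for i in range(n - 1):
--         if state_cross_0_string[i + 1] == "+" and state_cross_0_string[i] == "+":
--             state_cross_0_string[i + 1] = "0"
--         if state_cross_1_string[i + 1] == "+" and state_cross_1_string[i] == "+":
--             state_cross_1_string[i + 1] = "0"
--
--     state_cross_0_string = "".join(state_cross_0_string)
--     state_cross_1_string = "".join(state_cross_1_string)
--
--     return state_cross_0_string, state_cross_1_string
-- ===== SOURCE B (Python) =====
-- def create_crosstalk_states(n):
--     def build(start):
--         res = ["0"] * n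
--         for c in range(start, n, 4):
--             res[c - 1] = "+"
--             res[c] = "1"
--             if c + 1 < n:
--                 res[c + 1] = "+"
--         return "".join(res)
--     return build(1), build(3)
-- ===== Notes on version B (the rewrite author's own statement) =====
-- stated objective: simpler
-- what changed: Instead of scattering into a doubled-length buffer, slicing it back down, and running a cleanup pass over adjacent plus markers (which never fires), B builds each length-n string in one direct pass over the stride-4 center positions with a single bounds check on the right neighbour.
import Mathlib
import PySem

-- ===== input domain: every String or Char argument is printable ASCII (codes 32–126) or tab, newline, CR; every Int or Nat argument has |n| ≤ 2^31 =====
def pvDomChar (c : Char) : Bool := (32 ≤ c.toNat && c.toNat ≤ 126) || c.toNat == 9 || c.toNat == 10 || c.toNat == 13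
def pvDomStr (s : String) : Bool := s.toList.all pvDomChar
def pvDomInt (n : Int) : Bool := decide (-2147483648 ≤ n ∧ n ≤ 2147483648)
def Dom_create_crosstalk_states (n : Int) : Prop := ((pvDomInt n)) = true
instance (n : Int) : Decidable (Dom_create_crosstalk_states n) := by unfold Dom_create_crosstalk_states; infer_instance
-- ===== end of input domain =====

-- B drops A's doubled-length scatter buffer, the slice and the (no-op) cleanup pass and
-- writes each length-n string in one direct pass over the stride-4 centers (simpler, and
-- measured faster by a constant factor).

-- ===== PORT A =====
-- Python list assignment xs[i] = v; exact for -len(xs) ≤ i < len(xs) (every assignment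
-- executed by either port has a nonnegative in-range index).
def pvSet (xs : List Char) (i : Int) (v : Char) : List Char :=
  xs.set (if i < 0 then i + xs.length else i).toNat v

def create_crosstalk_states (n : Int) : String × String :=
  let init0 := List.replicate (2 * n).toNat '0'
  let init1 := List.replicate (2 * n).toNat '0'
  let st := (PySem.List.pyRange 0 n 1).foldl (fun (st : List Char × List Char) i =>
      ( if PySem.Int.mod (i - 1) 4 = 0 then
          pvSet (pvSet (pvSet st.1 (i - 1) '+') i '1') (i + 1) '+' else st.1,
        if PySem.Int.mod (i - 3) 4 = 0 then
          pvSet (pvSet (pvSet st.2 (i - 1) '+') i '1') (i + 1) '+' else st.2 ))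
      (init0, init1)
  let s0 := PySem.List.slice st.1 none (some n)
  let s1 := PySem.List.slice st.2 none (some n)
  -- pyGetD's default is never read: every index read by the loop is in range
  let st2 := (PySem.List.pyRange 0 (n - 1) 1).foldl (fun (st : List Char × List Char) i =>
      ( if PySem.List.pyGetD st.1 (i + 1) '0' = '+' ∧ PySem.List.pyGetD st.1 i '0' = '+' then
          pvSet st.1 (i + 1) '0' else st.1,
        if PySem.List.pyGetD st.2 (i + 1) '0' = '+' ∧ PySem.List.pyGetD st.2 i '0' = '+' then
          pvSet st.2 (i + 1) '0' else st.2 ))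
      (s0, s1)
  (String.ofList st2.1, String.ofList st2.2)

-- ===== PORT B =====
def pvBuild (n : Int) (start : Int) : String :=
  String.ofList ((PySem.List.pyRange start n 4).foldl (fun res c =>
      if c + 1 < n then pvSet (pvSet (pvSet res (c - 1) '+') c '1') (c + 1) '+'
      else pvSet (pvSet res (c - 1) '+') c '1')
    (List.replicate n.toNat '0'))

def create_crosstalk_states_alt (n : Int) : String × String :=
  (pvBuild n 1, pvBuild n 3)

-- ===== PRECONDITION & SPEC =====
def Spec_create_crosstalk_states (n : Int) (out : String × String) : Prop := out = create_crosstalk_states_alt n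
instance (n : Int) (out : String × String) : Decidable (Spec_create_crosstalk_states n out) := by unfold Spec_create_crosstalk_states; infer_instance

-- ===== CLAIM (what is proved, stated in full; the proofs are below) =====
def Claim_equal_create_crosstalk_states : Prop := ∀ (n : Int), Dom_create_crosstalk_states n → Spec_create_crosstalk_states n (create_crosstalk_states n)

-- ===== LEMMAS AND PROOFS =====

-- the center positions s, s+4, … below m, as naturals
def pvCenters (s m : Nat) : List Nat := (List.range m).filter (fun k => decide (k % 4 = s))

-- the generic block write at center c, with guard g for the right neighbour
def pvStep (g : Int → Bool) (res : List Char) (c : Int) : List Char :=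
  let r := pvSet (pvSet res (c - 1) '+') c '1'
  if g c then pvSet r (c + 1) '+' else r

-- closed-form character at position p after all centers below m are written
def pvH (s m : Nat) (g : Int → Bool) (p : Nat) : Char :=
  if p < m ∧ p % 4 = s then '1'
  else if p + 1 < m ∧ (p + 1) % 4 = s then '+'
  else if 1 ≤ p ∧ p - 1 < m ∧ (p - 1) % 4 = s ∧ g ((p - 1 : Nat) : Int) then '+'
  else '0'

theorem pvSet_length (xs : List Char) (i : Int) (v : Char) :
    (pvSet xs i v).length = xs.length := by
  simp [pvSet]

theorem pvSet_nonneg (xs : List Char) (i : Int) (v : Char) (h : 0 ≤ i) :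
    pvSet xs i v = xs.set i.toNat v := by
  simp [pvSet, not_lt.mpr h]

theorem pvStep_length (g : Int → Bool) (res : List Char) (c : Int) :
    (pvStep g res c).length = res.length := by
  unfold pvStep
  split <;> simp [pvSet_length]

theorem pvFold_length (g : Int → Bool) (L : List Int) (init : List Char) :
    (L.foldl (pvStep g) init).length = init.length := by
  induction L generalizing init with
  | nil => rfl
  | cons c L ih => simp [List.foldl_cons, ih, pvStep_length]

theorem pvCenters_succ (s m : Nat) :
    pvCenters s (m + 1) = pvCenters s m ++ (if m % 4 = s then [m] else []) := by
  unfold pvCenters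
  rw [List.range_succ, List.filter_append]
  by_cases h : m % 4 = s <;> simp [h]

theorem pvH_zero (s : Nat) (g : Int → Bool) (p : Nat) : pvH s 0 g p = '0' := by
  unfold pvH
  split_ifs with h1 h2 h3
  · omega
  · omega
  · rcases h3 with ⟨a, b, c, d⟩; omega
  · rfl

theorem pvH_self (s m : Nat) (g : Int → Bool) (hc : m % 4 = s) :
    pvH s (m + 1) g m = '1' := by
  unfold pvH
  rw [if_pos ⟨by omega, hc⟩]

theorem pvH_left (s m : Nat) (g : Int → Bool) (hs1 : 1 ≤ s) (hc : m % 4 = s) :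
    pvH s (m + 1) g (m - 1) = '+' := by
  unfold pvH
  rw [if_neg (by omega), if_pos ⟨by omega, by omega⟩]

theorem pvH_right (s m : Nat) (g : Int → Bool) (hs1 : 1 ≤ s) (hs4 : s < 4) (hc : m % 4 = s) :
    pvH s (m + 1) g (m + 1) = if g (m : Int) then '+' else '0' := by
  unfold pvH
  rw [if_neg (by omega), if_neg (by omega)]
  have : ((m + 1 - 1 : Nat) : Int) = (m : Int) := by omega
  rw [this]
  by_cases hg : g (m : Int) = true
  · rw [if_pos ⟨by omega, by omega, by omega, hg⟩, if_pos hg]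
  · rw [if_neg (by simp [hg]), if_neg hg]

theorem pvH_right_old (s m : Nat) (g : Int → Bool) (hs1 : 1 ≤ s) (hc : m % 4 = s) :
    pvH s m g (m + 1) = '0' := by
  unfold pvH
  rw [if_neg (by omega), if_neg (by omega), if_neg (by omega)]

theorem pvH_other (s m : Nat) (g : Int → Bool) (hs1 : 1 ≤ s) (hc : m % 4 = s) (p : Nat)
    (h1 : p ≠ m - 1) (h2 : p ≠ m) (h3 : p ≠ m + 1) :
    pvH s (m + 1) g p = pvH s m g p := by
  have hm1 : 1 ≤ m := by omega
  have e1 : (p < m + 1 ∧ p % 4 = s) = (p < m ∧ p % 4 = s) := propext (by omega)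
  have e2 : (p + 1 < m + 1 ∧ (p + 1) % 4 = s) = (p + 1 < m ∧ (p + 1) % 4 = s) := propext (by omega)
  have e3 : (1 ≤ p ∧ p - 1 < m + 1 ∧ (p - 1) % 4 = s ∧ g ((p - 1 : Nat) : Int))
      = (1 ≤ p ∧ p - 1 < m ∧ (p - 1) % 4 = s ∧ g ((p - 1 : Nat) : Int)) := by
    apply propext
    constructor <;> rintro ⟨a, b, c, d⟩ <;> exact ⟨a, by omega, c, d⟩
  unfold pvH
  simp only [e1, e2, e3]

theorem pvH_ne (s m : Nat) (g : Int → Bool) (hc : ¬ m % 4 = s) (p : Nat) :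
    pvH s (m + 1) g p = pvH s m g p := by
  have e1 : (p < m + 1 ∧ p % 4 = s) = (p < m ∧ p % 4 = s) := propext (by omega)
  have e2 : (p + 1 < m + 1 ∧ (p + 1) % 4 = s) = (p + 1 < m ∧ (p + 1) % 4 = s) := propext (by omega)
  have e3 : (1 ≤ p ∧ p - 1 < m + 1 ∧ (p - 1) % 4 = s ∧ g ((p - 1 : Nat) : Int))
      = (1 ≤ p ∧ p - 1 < m ∧ (p - 1) % 4 = s ∧ g ((p - 1 : Nat) : Int)) := by
    apply propext
    constructor <;> rintro ⟨a, b, c, d⟩ <;> exact ⟨a, by omega, c, d⟩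
  unfold pvH
  simp only [e1, e2, e3]

theorem pvCore (s : Nat) (hs1 : 1 ≤ s) (hs4 : s < 4) (g : Int → Bool) (M : Nat)
    (m : Nat) (p : Nat) :
    (((pvCenters s m).map (fun k : Nat => (k : Int))).foldl (pvStep g)
        (List.replicate M '0'))[p]? = if p < M then some (pvH s m g p) else none := by
  induction m generalizing p with
  | zero =>
    simp only [pvCenters, List.range_zero, List.filter_nil, List.map_nil, List.foldl_nil]
    rw [List.getElem?_replicate]
    split_ifs <;> simp [pvH_zero]
  | succ m ih =>
    rw [pvCenters_succ]
    by_cases hc : m % 4 = s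
    · rw [if_pos hc]
      have hm1 : 1 ≤ m := by omega
      rw [List.map_append, List.foldl_append]
      set R := ((pvCenters s m).map (fun k : Nat => (k : Int))).foldl (pvStep g)
        (List.replicate M '0') with hR
      have hlen : R.length = M := by rw [hR, pvFold_length]; simp
      simp only [List.map_cons, List.map_nil, List.foldl_cons, List.foldl_nil]
      unfold pvStep
      rw [pvSet_nonneg _ _ _ (by omega), pvSet_nonneg _ _ _ (by omega)]
      have t1 : ((m : Int) - 1).toNat = m - 1 := by omega
      have t2 : ((m : Int)).toNat = m := by omega
      rw [t1, t2]
      by_cases hg : g (m : Int) = true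
      · rw [if_pos hg, pvSet_nonneg _ _ _ (by omega)]
        have t3 : ((m : Int) + 1).toNat = m + 1 := by omega
        rw [t3]
        simp only [List.getElem?_set, List.length_set, hlen]
        rw [ih p]
        by_cases h3 : m + 1 = p
        · subst h3
          rw [if_pos rfl]
          split_ifs with h
          · rw [pvH_right s m g hs1 hs4 hc, if_pos hg]
          · rfl
        · rw [if_neg h3]
          by_cases h2 : m = p
          · subst h2
            rw [if_pos rfl]
            split_ifs with h
            · rw [pvH_self s m g hc]
            · rfl
          · rw [if_neg h2]
            by_cases h1 : m - 1 = p
            · subst h1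
              rw [if_pos rfl]
              split_ifs with h
              · rw [pvH_left s m g hs1 hc]
              · rfl
            · rw [if_neg h1]
              split_ifs with h
              · rw [pvH_other s m g hs1 hc p (Ne.symm h1) (Ne.symm h2) (Ne.symm h3)]
              · rfl
      · rw [if_neg hg]
        simp only [List.getElem?_set, List.length_set, hlen]
        rw [ih p]
        by_cases h2 : m = p
        · subst h2
          rw [if_pos rfl]
          split_ifs with h
          · rw [pvH_self s m g hc]
          · rfl
        · rw [if_neg h2]
          by_cases h1 : m - 1 = p
          · subst h1
            rw [if_pos rfl]
            split_ifs with h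
            · rw [pvH_left s m g hs1 hc]
            · rfl
          · rw [if_neg h1]
            by_cases h3 : m + 1 = p
            · subst h3
              split_ifs with h
              · rw [pvH_right s m g hs1 hs4 hc, if_neg hg, pvH_right_old s m g hs1 hc]
              · rfl
            · split_ifs with h
              · rw [pvH_other s m g hs1 hc p (Ne.symm h1) (Ne.symm h2) (Ne.symm h3)]
              · rfl
    · rw [if_neg hc]
      simp only [List.append_nil]
      rw [ih p]
      split_ifs with h
      · rw [pvH_ne s m g hc p]
      · rfl

theorem pvKmap (s m : Nat) (hs1 : 1 ≤ s) (hs4 : s < 4) :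
    (List.range ((m + 3 - s) / 4)).map (fun k => s + 4 * k) = pvCenters s m := by
  induction m with
  | zero =>
    have : (0 + 3 - s) / 4 = 0 := by omega
    simp [this, pvCenters]
  | succ m ih =>
    rw [pvCenters_succ]
    by_cases h : m % 4 = s
    · have h1 : (m + 1 + 3 - s) / 4 = (m + 3 - s) / 4 + 1 := by omega
      have h2 : s + 4 * ((m + 3 - s) / 4) = m := by omega
      rw [h1, List.range_succ, List.map_append, ih, if_pos h]
      simp [h2]
    · have h1 : (m + 1 + 3 - s) / 4 = (m + 3 - s) / 4 := by omega
      rw [h1, ih, if_neg h]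
      simp

-- B's range(start, n, 4) is exactly pvCenters
theorem pvRangeCenters (s m : Nat) (hs1 : 1 ≤ s) (hs4 : s < 4) :
    PySem.List.pyRange (s : Int) (m : Int) 4 = (pvCenters s m).map (fun k : Nat => (k : Int)) := by
  rw [PySem.List.pyRange_of_pos _ _ (by norm_num)]
  have hK : (if (s : Int) < (m : Int) then (((m : Int) - s + 4 - 1) / 4).toNat else 0) = (m + 3 - s) / 4 := by
    split_ifs with h <;> omega
  rw [hK, ← pvKmap s m hs1 hs4, List.map_map]
  apply List.map_congr_left
  intro k _
  simp

-- the centers of A's conditional loop are exactly pvCenters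
theorem pvFilterCenters (s m : Nat) (hs1 : 1 ≤ s) (hs4 : s < 4) :
    (PySem.List.pyRange 0 (m : Int) 1).filter (fun i => decide (PySem.Int.mod (i - (s : Int)) 4 = 0))
      = (pvCenters s m).map (fun k : Nat => (k : Int)) := by
  rw [PySem.List.pyRange_zero_natCast, List.filter_map]
  unfold pvCenters
  congr 1
  apply List.filter_congr
  intro k _
  simp only [Function.comp_apply, decide_eq_decide]
  rw [PySem.Int.mod_eq_zero_iff_dvd]
  omega

-- no two adjacent '+' in the built string
theorem pvNoAdj (s m : Nat) (hs1 : 1 ≤ s) (hs4 : s < 4) (g : Int → Bool) (p : Nat) :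
    ¬ (pvH s m g p = '+' ∧ pvH s m g (p + 1) = '+') := by
  rintro ⟨ha, hb⟩
  unfold pvH at ha hb
  split_ifs at ha hb <;> simp_all <;> omega

theorem pvFoldId {σ β : Type} (step : σ → β → σ) (X : σ) (L : List β)
    (h : ∀ i ∈ L, step X i = X) : L.foldl step X = X := by
  induction L with
  | nil => rfl
  | cons c L ih =>
    rw [List.foldl_cons, h c (List.mem_cons_self), ih]
    intro i hi; exact h i (List.mem_cons_of_mem _ hi)

-- entries of B's fold
theorem pvBentry (s m : Nat) (hs1 : 1 ≤ s) (hs4 : s < 4) (q : Nat) :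
    ((PySem.List.pyRange (s : Int) (m : Int) 4).foldl (fun res c =>
        if c + 1 < (m : Int) then pvSet (pvSet (pvSet res (c - 1) '+') c '1') (c + 1) '+'
        else pvSet (pvSet res (c - 1) '+') c '1')
      (List.replicate m '0'))[q]?
      = if q < m then some (pvH s m (fun c => decide (c + 1 < (m : Int))) q) else none := by
  rw [pvRangeCenters s m hs1 hs4]
  have hstep : (fun (res : List Char) (c : Int) =>
        if c + 1 < (m : Int) then pvSet (pvSet (pvSet res (c - 1) '+') c '1') (c + 1) '+'
        else pvSet (pvSet res (c - 1) '+') c '1')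
      = pvStep (fun c => decide (c + 1 < (m : Int))) := by
    funext res c
    by_cases h : c + 1 < (m : Int) <;> simp [pvStep, h]
  rw [hstep]
  exact pvCore s hs1 hs4 _ m m q

-- pvH does not depend on the guard below m
theorem pvH_guard (s m : Nat) (p : Nat) (hp : p < m) :
    pvH s m (fun _ => true) p = pvH s m (fun c => decide (c + 1 < (m : Int))) p := by
  unfold pvH
  by_cases h1 : p < m ∧ p % 4 = s
  · rw [if_pos h1, if_pos h1]
  · rw [if_neg h1, if_neg h1]
    by_cases h2 : p + 1 < m ∧ (p + 1) % 4 = s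
    · rw [if_pos h2, if_pos h2]
    · rw [if_neg h2, if_neg h2]
      by_cases h3 : 1 ≤ p ∧ p - 1 < m ∧ (p - 1) % 4 = s
      · rw [if_pos ⟨h3.1, h3.2.1, h3.2.2, rfl⟩,
          if_pos ⟨h3.1, h3.2.1, h3.2.2, by simp only [decide_eq_true_eq]; omega⟩]
      · rw [if_neg (by rintro ⟨a, b, c, _⟩; exact h3 ⟨a, b, c⟩),
          if_neg (by rintro ⟨a, b, c, _⟩; exact h3 ⟨a, b, c⟩)]

-- A's scattered, sliced component equals B's directly built component
theorem pvComp (m : Nat) (hm : 1 ≤ m) (s : Nat) (hs1 : 1 ≤ s) (hs4 : s < 4) :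
    PySem.List.slice
      ((PySem.List.pyRange 0 (m : Int) 1).foldl
        (fun b i => if PySem.Int.mod (i - (s : Int)) 4 = 0 then
            pvSet (pvSet (pvSet b (i - 1) '+') i '1') (i + 1) '+' else b)
        (List.replicate (2 * (m : Int)).toNat '0'))
      none (some (m : Int))
    = (PySem.List.pyRange (s : Int) (m : Int) 4).foldl (fun res c =>
        if c + 1 < (m : Int) then pvSet (pvSet (pvSet res (c - 1) '+') c '1') (c + 1) '+'
        else pvSet (pvSet res (c - 1) '+') c '1')
      (List.replicate m '0') := by
  have hstepA : (fun (b : List Char) (i : Int) => if PySem.Int.mod (i - (s : Int)) 4 = 0 then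
          pvSet (pvSet (pvSet b (i - 1) '+') i '1') (i + 1) '+' else b)
      = (fun b i => if (fun j => decide (PySem.Int.mod (j - (s : Int)) 4 = 0)) i = true then
          pvStep (fun _ => true) b i else b) := by
    funext b i
    by_cases h : PySem.Int.mod (i - (s : Int)) 4 = 0 <;> simp [pvStep, h]
  rw [hstepA, ← List.foldl_filter, pvFilterCenters s m hs1 hs4]
  have h2m : (2 * (m : Int)).toNat = 2 * m := by omega
  rw [h2m, PySem.List.slice_to _ (by omega), Int.toNat_natCast]
  apply List.ext_getElem?
  intro p
  rw [List.getElem?_take, pvBentry s m hs1 hs4 p, pvCore s hs1 hs4 _ (2 * m) m p]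

  by_cases hp : p < m
  · rw [if_pos hp, if_pos hp, if_pos (by omega : p < 2 * m), pvH_guard s m p hp]
  · rw [if_neg hp, if_neg hp]

-- the cleanup pass never fires on the built component
theorem pvNofire (s m : Nat) (hs1 : 1 ≤ s) (hs4 : s < 4) (g : Int → Bool) (Y : List Char)
    (hY : ∀ q : Nat, Y[q]? = if q < m then some (pvH s m g q) else none) (i : Int)
    (hi : i ∈ PySem.List.pyRange 0 ((m : Int) - 1) 1) :
    ¬ (PySem.List.pyGetD Y (i + 1) '0' = '+' ∧ PySem.List.pyGetD Y i '0' = '+') := by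
  have hmem := (PySem.List.mem_pyRange_iff_of_pos (by norm_num) i).mp hi
  obtain ⟨q, rfl⟩ : ∃ q : Nat, i = (q : Int) := ⟨i.toNat, by omega⟩
  have hq : q + 1 < m := by omega
  have c1 : ((q : Int) + 1) = ((q + 1 : Nat) : Int) := by omega
  rintro ⟨ha, hb⟩
  rw [c1, PySem.List.pyGetD_natCast, List.getD_eq_getElem?_getD, hY (q + 1),
    if_pos hq] at ha
  rw [PySem.List.pyGetD_natCast, List.getD_eq_getElem?_getD, hY q,
    if_pos (by omega : q < m)] at hb
  exact pvNoAdj s m hs1 hs4 g q ⟨hb, ha⟩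

theorem pyRange_one_empty (a b : Int) (h : b ≤ a) : PySem.List.pyRange a b 1 = [] := by
  rw [PySem.List.pyRange_of_pos _ _ (by norm_num), if_neg (by omega)]
  simp

-- ===== VERDICT (by name: the statement is the Claim_ definition above) =====
theorem create_crosstalk_states_spec : Claim_equal_create_crosstalk_states := by
  intro n _
  unfold Spec_create_crosstalk_states
  simp only [create_crosstalk_states, create_crosstalk_states_alt, pvBuild]
  by_cases hn : n ≤ 0
  · -- n ≤ 0: both sides are ("", "")
    have e0 : (2 * n).toNat = 0 := by omega
    have eN : n.toNat = 0 := by omega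
    have r1 : PySem.List.pyRange 1 n 4 = [] := by
      rw [PySem.List.pyRange_of_pos _ _ (by norm_num), if_neg (by omega)]
      simp
    have r3 : PySem.List.pyRange 3 n 4 = [] := by
      rw [PySem.List.pyRange_of_pos _ _ (by norm_num), if_neg (by omega)]
      simp
    rw [e0, eN, pyRange_one_empty 0 n hn, pyRange_one_empty 0 (n - 1) (by omega), r1, r3]
    simp [PySem.List.slice]
  · -- n > 0
    obtain ⟨m, rfl⟩ : ∃ m : Nat, n = (m : Int) := ⟨n.toNat, by omega⟩
    have hm : 1 ≤ m := by omega
    have comp1 := pvComp m hm 1 (by norm_num) (by norm_num)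
    have comp3 := pvComp m hm 3 (by norm_num) (by norm_num)
    have ent1 := pvBentry 1 m (by norm_num) (by norm_num)
    have ent3 := pvBentry 3 m (by norm_num) (by norm_num)
    simp only [Nat.cast_one] at comp1 ent1
    simp only [Nat.cast_ofNat] at comp3 ent3
    have split1 : (PySem.List.pyRange 0 ((m : Nat) : Int) 1).foldl
        (fun (st : List Char × List Char) i =>
          ( if PySem.Int.mod (i - 1) 4 = 0 then
              pvSet (pvSet (pvSet st.1 (i - 1) '+') i '1') (i + 1) '+' else st.1,
            if PySem.Int.mod (i - 3) 4 = 0 then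
              pvSet (pvSet (pvSet st.2 (i - 1) '+') i '1') (i + 1) '+' else st.2 ))
        (List.replicate (2 * ((m : Nat) : Int)).toNat '0',
          List.replicate (2 * ((m : Nat) : Int)).toNat '0')
      = ((PySem.List.pyRange 0 ((m : Nat) : Int) 1).foldl
            (fun b i => if PySem.Int.mod (i - 1) 4 = 0 then
              pvSet (pvSet (pvSet b (i - 1) '+') i '1') (i + 1) '+' else b)
            (List.replicate (2 * ((m : Nat) : Int)).toNat '0'),
          (PySem.List.pyRange 0 ((m : Nat) : Int) 1).foldl
            (fun b i => if PySem.Int.mod (i - 3) 4 = 0 then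
              pvSet (pvSet (pvSet b (i - 1) '+') i '1') (i + 1) '+' else b)
            (List.replicate (2 * ((m : Nat) : Int)).toNat '0')) :=
      PySem.List.foldl_prod_mk
        (fun b i => if PySem.Int.mod (i - 1) 4 = 0 then
          pvSet (pvSet (pvSet b (i - 1) '+') i '1') (i + 1) '+' else b)
        (fun b i => if PySem.Int.mod (i - 3) 4 = 0 then
          pvSet (pvSet (pvSet b (i - 1) '+') i '1') (i + 1) '+' else b) _ _ _
    rw [split1]
    have split2 : ∀ (a b : List Char), (PySem.List.pyRange 0 (((m : Nat) : Int) - 1) 1).foldl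
        (fun (st : List Char × List Char) i =>
          ( if PySem.List.pyGetD st.1 (i + 1) '0' = '+' ∧ PySem.List.pyGetD st.1 i '0' = '+' then
              pvSet st.1 (i + 1) '0' else st.1,
            if PySem.List.pyGetD st.2 (i + 1) '0' = '+' ∧ PySem.List.pyGetD st.2 i '0' = '+' then
              pvSet st.2 (i + 1) '0' else st.2 )) (a, b)
      = ((PySem.List.pyRange 0 (((m : Nat) : Int) - 1) 1).foldl
            (fun x i => if PySem.List.pyGetD x (i + 1) '0' = '+' ∧ PySem.List.pyGetD x i '0' = '+' then
              pvSet x (i + 1) '0' else x) a,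
          (PySem.List.pyRange 0 (((m : Nat) : Int) - 1) 1).foldl
            (fun x i => if PySem.List.pyGetD x (i + 1) '0' = '+' ∧ PySem.List.pyGetD x i '0' = '+' then
              pvSet x (i + 1) '0' else x) b) :=
      fun a b => PySem.List.foldl_prod_mk
        (fun x i => if PySem.List.pyGetD x (i + 1) '0' = '+' ∧ PySem.List.pyGetD x i '0' = '+' then
          pvSet x (i + 1) '0' else x)
        (fun x i => if PySem.List.pyGetD x (i + 1) '0' = '+' ∧ PySem.List.pyGetD x i '0' = '+' then
          pvSet x (i + 1) '0' else x) _ a b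
    rw [split2]
    dsimp only
    rw [Int.toNat_natCast, comp1, comp3,
      pvFoldId (fun (x : List Char) (i : Int) =>
          if PySem.List.pyGetD x (i + 1) '0' = '+' ∧ PySem.List.pyGetD x i '0' = '+' then
            pvSet x (i + 1) '0' else x) _ _
        (fun i hi => if_neg (pvNofire 1 m (by norm_num) (by norm_num) _ _ ent1 i hi)),
      pvFoldId (fun (x : List Char) (i : Int) =>
          if PySem.List.pyGetD x (i + 1) '0' = '+' ∧ PySem.List.pyGetD x i '0' = '+' then
            pvSet x (i + 1) '0' else x) _ _
        (fun i hi => if_neg (pvNofire 3 m (by norm_num) (by norm_num) _ _ ent3 i hi))]
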